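-- pv_equiv track=rewrite | github.com/mbuhidar/retro_typein_tools | retrotype/retrotype.py | ahoy3_checksum
-- ===== SOURCE A (Python) =====
-- def ahoy3_checksum(line_num, byte_list):
--     """
--     Function to create Ahoy checksums from passed in line number and
--     byte list to match the codes printed in the magazine to check each
--     line for typed in accuracy. Covers the last Ahoy Bug Repellent
--     version introduced in May 1987.
--     """
--
--     xor_value = 0
--     char_position = 0
--     in_quotes = False
--
--     line_low = line_num % 256
--     line_hi = int(line_num / 256)
--
--     byte_list = [line_low] + [line_hi] + byte_list
--
--     # byte_list.insert(0, line_hi)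
--     # byte_list.insert(0, line_low)
--
--     for char_val in byte_list:
--
--         # Detect quote symbol in line and toggle in-quotes flag
--         if char_val == 34:
--             in_quotes = not in_quotes
--
--         # Detect spaces that are outside of quotes and ignore them, else
--         # execute primary checksum generation algorithm
--         if char_val == 32 and in_quotes is False:
--             continue
--
--         next_value = char_val + xor_value
--
--         xor_value = next_value ^ char_position
--
--         # limit next value to fit in one byte
--         next_value = next_value & 255
--
--         char_position = char_position + 1
--
--     # get high nibble of xor_value
--     high_nib = (xor_value & 0xf0) >> 4
--     high_char_val = high_nib + 65  # 0x41
--     # high_char_val = high_char_val & 0x0f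
--     # get low nibble of xor_value
--     low_nib = xor_value & 0x0f
--     low_char_val = low_nib + 65  # 0x41
--     # low_char_val = low_char_val & 0x0f
--     checksum = chr(high_char_val) + chr(low_char_val)
--     return checksum
-- ===== SOURCE B (Python) =====
-- def ahoy3_checksum(line_num, byte_list):
--     """Ahoy Bug Repellent checksum (May 1987), via split-on-quote decomposition:
--     the byte stream is split on the quote character into segments; segments at
--     even positions lie outside quotes and have their spaces removed, odd ones
--     are kept verbatim; the segments are rejoined with the quote bytes and the
--     result is folded with an enumerated xor accumulator."""
--     data = [line_num % 256, int(line_num / 256)] + byte_list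
--
--     # split on the quote character (34); no in-quotes flag anywhere
--     segments = []
--     cur = []
--     for b in data:
--         if b == 34:
--             segments.append(cur)
--             cur = []
--         else:
--             cur.append(b)
--     segments.append(cur)
--
--     # even-indexed segments are outside quotes: drop their spaces;
--     # rejoin everything with the quote bytes as separators
--     kept = []
--     for i, seg in enumerate(segments):
--         if i > 0:
--             kept.append(34)
--         kept.extend(seg if i % 2 == 1 else [b for b in seg if b != 32])
--
--     x = 0
--     for pos, b in enumerate(kept):
--         x = (b + x) ^ pos
--
--     return chr(((x & 0xF0) >> 4) + 65) + chr((x & 0x0F) + 65)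
-- ===== Notes on version B (the rewrite author's own statement) =====
-- stated objective: alternative
-- what changed: Replaces A's single stateful pass (in_quotes toggle + space skipping + checksum interleaved, with a continue) by a split-on-delimiter algorithm with no quote flag at all: the stream is split on the quote byte into segments, spaces are filtered from even-(parity)-indexed segments only, the segments are rejoined with the quote bytes, and the checksum is a separate enumerated fold; the dead '& 255' statement is dropped.
import Mathlib
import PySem

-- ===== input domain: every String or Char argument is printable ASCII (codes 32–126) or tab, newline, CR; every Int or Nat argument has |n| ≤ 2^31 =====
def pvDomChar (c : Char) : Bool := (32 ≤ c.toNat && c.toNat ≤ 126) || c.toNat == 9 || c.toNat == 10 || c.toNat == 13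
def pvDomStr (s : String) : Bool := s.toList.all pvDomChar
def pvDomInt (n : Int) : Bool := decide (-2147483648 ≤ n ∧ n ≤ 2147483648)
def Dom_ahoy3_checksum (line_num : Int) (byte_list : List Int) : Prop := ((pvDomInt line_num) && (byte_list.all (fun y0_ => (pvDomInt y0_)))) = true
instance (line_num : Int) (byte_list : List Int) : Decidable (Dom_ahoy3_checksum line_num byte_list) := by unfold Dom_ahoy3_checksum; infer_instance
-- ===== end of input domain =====

-- B replaces A's single stateful in_quotes loop by a split-on-quote / parity-filter / rejoin / enumerated-fold algorithm (same cost); return values proved equal on the whole domain.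


-- ===== PORT A =====
-- one step of A's loop; state = (xor_value, char_position, in_quotes)
def pvAStep (st : Int × Int × Bool) (char_val : Int) : Int × Int × Bool :=
  let in_quotes := if char_val == 34 then !st.2.2 else st.2.2
  if char_val == 32 && in_quotes == false then (st.1, st.2.1, in_quotes)
  else
    let next_value := char_val + st.1
    let xor_value := PySem.Int.bxor next_value st.2.1
    -- 'next_value = next_value & 255' in A is dead (next_value is not read again)
    (xor_value, st.2.1 + 1, in_quotes)

def ahoy3_checksum (line_num : Int) (byte_list : List Int) : String :=
  let line_low := PySem.Int.mod line_num 256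
  -- int(line_num / 256): float division by 256 is exact for |line_num| ≤ 2^31, then truncation toward zero
  let line_hi := PySem.Int.truncdiv line_num 256
  let bl := [line_low] ++ [line_hi] ++ byte_list
  let st := bl.foldl pvAStep (0, 0, false)
  let xor_value := st.1
  let high_nib := (PySem.Int.band xor_value 0xf0) >>> 4
  let high_char_val := high_nib + 65
  let low_nib := PySem.Int.band xor_value 0x0f
  let low_char_val := low_nib + 65
  String.ofList [Char.ofNat high_char_val.toNat, Char.ofNat low_char_val.toNat]

-- ===== PORT B =====
-- split loop: state = (segments, cur)
def pvSplitStep (st : List (List Int) × List Int) (b : Int) : List (List Int) × List Int :=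
  if b == 34 then (st.1 ++ [st.2], []) else (st.1, st.2 ++ [b])

-- rejoin loop over enumerate(segments): even segments lose their spaces
def pvKeptStep (kept : List Int) (p : Int × List Int) : List Int :=
  (if p.1 > 0 then kept ++ [34] else kept) ++
    (if PySem.Int.mod p.1 2 == 1 then p.2 else p.2.filter (fun b => b != 32))

-- checksum loop over enumerate(kept)
def pvChkStep (x : Int) (p : Int × Int) : Int := PySem.Int.bxor (p.2 + x) p.1

def ahoy3_checksum_alt (line_num : Int) (byte_list : List Int) : String :=
  let data := [PySem.Int.mod line_num 256, PySem.Int.truncdiv line_num 256] ++ byte_list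
  let st := data.foldl pvSplitStep ([], [])
  let segments := st.1 ++ [st.2]
  let kept := (PySem.List.enumerate segments).foldl pvKeptStep []
  let x := (PySem.List.enumerate kept).foldl pvChkStep 0
  String.ofList [Char.ofNat ((PySem.Int.band x 0xf0) >>> 4 + 65).toNat,
             Char.ofNat ((PySem.Int.band x 0x0f) + 65).toNat]

-- ===== PRECONDITION & SPEC =====
def Spec_ahoy3_checksum (line_num : Int) (byte_list : List Int) (out : String) : Prop := out = ahoy3_checksum_alt line_num byte_list
instance (line_num : Int) (byte_list : List Int) (out : String) : Decidable (Spec_ahoy3_checksum line_num byte_list out) := by unfold Spec_ahoy3_checksum; infer_instance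

-- ===== CLAIM (what is proved, stated in full; the proofs are below) =====
def Claim_equal_ahoy3_checksum : Prop := ∀ (line_num : Int) (byte_list : List Int), Dom_ahoy3_checksum line_num byte_list → Spec_ahoy3_checksum line_num byte_list (ahoy3_checksum line_num byte_list)

-- ===== LEMMAS AND PROOFS =====
-- reference filter: the bytes that take part in the checksum (proof-only)
def pvContrib (bs : List Int) (in_quotes : Bool) : List Int :=
  match bs with
  | [] => []
  | b :: rest =>
    let inq := if b == 34 then !in_quotes else in_quotes
    if b != 32 || inq then b :: pvContrib rest inq else pvContrib rest inq

-- reference checksum step with an explicit position counter (proof-only)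
def pvBStep (acc : Int × Int) (b : Int) : Int × Int :=
  (PySem.Int.bxor (b + acc.1) acc.2, acc.2 + 1)

-- recursive splitter: (head segment, remaining segments)
def pvSplitR : List Int → List Int × List (List Int)
  | [] => ([], [])
  | b :: r =>
    let p := pvSplitR r
    if b == 34 then ([], p.1 :: p.2) else (b :: p.1, p.2)

-- recursive rejoin of segments starting at index i
def pvRefJoin : Int → List (List Int) → List Int
  | _, [] => []
  | i, s :: t =>
    (if i > 0 then [34] else []) ++
      (if PySem.Int.mod i 2 == 1 then s else s.filter (fun b => b != 32)) ++
      pvRefJoin (i + 1) t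

lemma pvLoop_eq (bs : List Int) : ∀ (x p : Int) (inq : Bool),
    ((List.foldl pvAStep (x, p, inq) bs).1, (List.foldl pvAStep (x, p, inq) bs).2.1)
      = List.foldl pvBStep (x, p) (pvContrib bs inq) := by
  induction bs with
  | nil => intro x p inq; simp [pvContrib]
  | cons b rest ih =>
    intro x p inq
    by_cases h34 : b = 34
    · simp [pvContrib, pvAStep, pvBStep, h34, ih]
    · by_cases h32 : b = 32
      · cases inq with
        | false => simp [pvContrib, pvAStep, h32, ih]
        | true => simp [pvContrib, pvAStep, pvBStep, h32, ih]
      · simp [pvContrib, pvAStep, pvBStep, h32, ih]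

lemma pvSplit_foldl (bs : List Int) : ∀ (segs : List (List Int)) (cur : List Int),
    (List.foldl pvSplitStep (segs, cur) bs).1 ++ [(List.foldl pvSplitStep (segs, cur) bs).2]
      = segs ++ (cur ++ (pvSplitR bs).1) :: (pvSplitR bs).2 := by
  induction bs with
  | nil => intro segs cur; simp [pvSplitR]
  | cons b r ih =>
    intro segs cur
    by_cases h : b = 34
    · simp [pvSplitStep, pvSplitR, h, ih]
    · simp [pvSplitStep, pvSplitR, h, ih]

lemma pvKept_foldl (ss : List (List Int)) : ∀ (i : Int) (acc : List Int),
    (PySem.List.enumerate ss i).foldl pvKeptStep acc = acc ++ pvRefJoin i ss := by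
  induction ss with
  | nil => intro i acc; simp [PySem.List.enumerate_nil, pvRefJoin]
  | cons s t ih =>
    intro i acc
    rw [PySem.List.enumerate_cons]
    simp only [List.foldl_cons, ih, pvRefJoin, pvKeptStep]
    by_cases h : i > 0 <;> simp [h]

lemma pvmod2 (i : Int) : PySem.Int.mod i 2 = i % 2 := by
  simp [PySem.Int.mod]
  exact Int.fmod_eq_emod_of_nonneg i (by norm_num)

lemma pvJoin_contrib (bs : List Int) : ∀ (i : Int), 0 ≤ i →
    (if i % 2 == 1 then (pvSplitR bs).1
     else (pvSplitR bs).1.filter (fun b => b != 32)) ++ pvRefJoin (i + 1) (pvSplitR bs).2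
      = pvContrib bs (i % 2 == 1) := by
  induction bs with
  | nil => intro i _; simp [pvSplitR, pvRefJoin, pvContrib]
  | cons b r ih =>
    intro i hi
    have hrec1 := ih (i + 1) (by omega)
    have hrec := ih i hi
    by_cases h34 : b = 34
    · have hpos : (0:Int) < i + 1 := by omega
      by_cases hq : i % 2 = 1
      · have hq1 : (i + 1) % 2 = 0 := by omega
        simp only [hq1, hq] at hrec1 ⊢
        simp at hrec1
        simp [pvSplitR, pvRefJoin, pvContrib, h34, hq1, hpos, hrec1]
      · have hq0 : i % 2 = 0 := by omega
        have hq1 : (i + 1) % 2 = 1 := by omega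
        simp only [hq1, hq0] at hrec1 ⊢
        simp at hrec1
        simp [pvSplitR, pvRefJoin, pvContrib, h34, hq1, hpos, hrec1]
    · by_cases hq : i % 2 = 1
      · simp only [hq] at hrec ⊢
        simp at hrec
        simp [pvSplitR, pvContrib, h34, hrec]
      · have hq0 : i % 2 = 0 := by omega
        simp only [hq0] at hrec ⊢
        simp at hrec
        by_cases h32 : b = 32
        · simp [pvSplitR, pvContrib, h32, hrec]
        · simp [pvSplitR, pvContrib, h34, h32, hrec]

lemma pvChk_foldl (L : List Int) : ∀ (x p : Int),
    (PySem.List.enumerate L p).foldl pvChkStep x = (List.foldl pvBStep (x, p) L).1 := by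
  induction L with
  | nil => intro x p; simp [PySem.List.enumerate_nil]
  | cons b t ih =>
    intro x p
    rw [PySem.List.enumerate_cons]
    simp [List.foldl_cons, pvChkStep, pvBStep, ih]

-- ===== VERDICT (by name: the statement is the Claim_ definition above) =====
theorem ahoy3_checksum_spec : Claim_equal_ahoy3_checksum := by
  intro line_num byte_list _
  unfold Spec_ahoy3_checksum ahoy3_checksum ahoy3_checksum_alt
  simp only [List.cons_append, List.nil_append]
  generalize (PySem.Int.mod line_num 256 :: PySem.Int.truncdiv line_num 256 :: byte_list) = data
  have hsegs : (List.foldl pvSplitStep ([], []) data).1 ++ [(List.foldl pvSplitStep ([], []) data).2]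
      = (pvSplitR data).1 :: (pvSplitR data).2 := by simpa using pvSplit_foldl data [] []
  have hkept : (PySem.List.enumerate ((List.foldl pvSplitStep ([], []) data).1 ++
        [(List.foldl pvSplitStep ([], []) data).2]) 0).foldl pvKeptStep []
      = pvContrib data false := by
    rw [hsegs, pvKept_foldl]
    have h0 := pvJoin_contrib data 0 (by omega)
    simp only [pvRefJoin, pvmod2] at *
    simpa using h0
  have hx : (List.foldl pvAStep (0, 0, false) data).1
      = (List.foldl pvBStep (0, 0) (pvContrib data false)).1 :=
    congrArg Prod.fst (pvLoop_eq data 0 0 false)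
  rw [hkept, pvChk_foldl, hx]
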